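-- pv_equiv track=rewrite | github.com/meeadi/Harmonique | utils/music_theory.py | build_scales
-- ===== SOURCE A (Python) =====
-- MAJOR_SCALE = [0, 2, 4, 5, 7, 9, 11]
--
-- MINOR_SCALE = [0, 2, 3, 5, 7, 8, 10]
--
-- def build_scales(root: int, scale_type: str) -> list:
--     if scale_type == 'major':
--         intervals = MAJOR_SCALE
--     elif scale_type == 'minor':
--         intervals = MINOR_SCALE
--     else:
--         raise ValueError(f"Unsupported scale type: {scale_type}")
--
--     return [(root + i) % 12 for i in intervals]
-- ===== SOURCE B (Python) =====
-- _STEPS = {'major': [2, 2, 1, 2, 2, 2, 1], 'minor': [2, 1, 2, 2, 1, 2, 2]}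
--
-- def build_scales(root: int, scale_type: str) -> list:
--     steps = _STEPS.get(scale_type)
--     if steps is None:
--         raise ValueError(f"Unsupported scale type: {scale_type}")
--     pitch = root % 12
--     notes = [pitch]
--     for s in steps[:-1]:
--         pitch = (pitch + s) % 12
--         notes.append(pitch)
--     return notes
-- ===== Notes on version B (the rewrite author's own statement) =====
-- stated objective: alternative
-- what changed: B represents each scale as a step/interval-delta pattern and builds the notes by sequential prefix-sum accumulation with incremental mod 12, instead of mapping independent absolute offsets (root+i)%12 over a fixed interval table.
import Mathlib
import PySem

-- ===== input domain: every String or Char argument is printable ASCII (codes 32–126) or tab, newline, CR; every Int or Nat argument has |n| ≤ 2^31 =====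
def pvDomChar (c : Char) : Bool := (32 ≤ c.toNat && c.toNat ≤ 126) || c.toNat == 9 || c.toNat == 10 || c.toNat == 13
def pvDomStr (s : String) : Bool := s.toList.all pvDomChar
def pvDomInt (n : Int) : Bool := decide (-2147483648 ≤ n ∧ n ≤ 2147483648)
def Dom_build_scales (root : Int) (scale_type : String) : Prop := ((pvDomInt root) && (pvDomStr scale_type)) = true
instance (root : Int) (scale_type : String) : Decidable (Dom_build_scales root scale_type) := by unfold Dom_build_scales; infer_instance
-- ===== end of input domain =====

-- B builds the scale by accumulating interval deltas with incremental mod 12 instead of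
-- mapping independent absolute offsets; same return value on all supported scale types.

-- ===== PORT A =====
def MAJOR_SCALE : List Int := [0, 2, 4, 5, 7, 9, 11]
def MINOR_SCALE : List Int := [0, 2, 3, 5, 7, 8, 10]

def build_scales (root : Int) (scale_type : String) : List Int :=
  if scale_type = "major" then
    MAJOR_SCALE.map (fun i => PySem.Int.mod (root + i) 12)
  else if scale_type = "minor" then
    MINOR_SCALE.map (fun i => PySem.Int.mod (root + i) 12)
  else
    []  -- ValueError: excluded by Pre_build_scales

-- ===== PORT B =====
def STEPS_B : PySem.Dict String (List Int) :=
  PySem.Dict.insert (PySem.Dict.insert PySem.Dict.empty "major" [2, 2, 1, 2, 2, 2, 1]) "minor" [2, 1, 2, 2, 1, 2, 2]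

def build_scales_alt (root : Int) (scale_type : String) : List Int :=
  match PySem.Dict.get? STEPS_B scale_type with
  | none => []  -- ValueError: excluded by Pre_build_scales
  | some steps =>
    let pitch0 := PySem.Int.mod root 12
    let st := (steps.dropLast.foldl
      (fun (acc : Int × List Int) s =>
        let p := PySem.Int.mod (acc.1 + s) 12
        (p, acc.2 ++ [p])) (pitch0, [pitch0]))
    st.2

-- ===== PRECONDITION & SPEC =====
-- Pre_ excludes exactly the scale types on which A raises ValueError.
def Pre_build_scales (root : Int) (scale_type : String) : Prop :=
  scale_type = "major" ∨ scale_type = "minor"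
instance (root : Int) (scale_type : String) : Decidable (Pre_build_scales root scale_type) := by
  unfold Pre_build_scales; infer_instance

def pvWitness_build_scales : Int × String := (7, "minor")

def Spec_build_scales (root : Int) (scale_type : String) (out : List Int) : Prop := out = build_scales_alt root scale_type
instance (root : Int) (scale_type : String) (out : List Int) : Decidable (Spec_build_scales root scale_type out) := by unfold Spec_build_scales; infer_instance

-- ===== CLAIM (what is proved, stated in full; the proofs are below) =====
def Claim_equal_build_scales : Prop := ∀ (root : Int) (scale_type : String), Dom_build_scales root scale_type → Pre_build_scales root scale_type → Spec_build_scales root scale_type (build_scales root scale_type)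

-- ===== LEMMAS AND PROOFS =====

-- ===== VERDICT (by name: the statement is the Claim_ definition above) =====
theorem build_scales_spec : Claim_equal_build_scales := by
  intro root scale_type _ hpre
  unfold Spec_build_scales build_scales build_scales_alt
  rcases hpre with h | h <;> subst h <;>
    simp [MAJOR_SCALE, MINOR_SCALE, STEPS_B, PySem.Dict.get?, PySem.Dict.insert,
      PySem.Dict.empty] <;> omega
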